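-- pv_equiv track=rewrite | github.com/Siiiid01/FileStoreProQ | plugins/games.py | aesthetify
-- ===== SOURCE A (Python) =====
-- def aesthetify(string):
--     light_font_offset = 0x1D5D4 - 0x41  # Uppercase A in the light font
--     result = []
--     for c in string:
--         if "A" <= c <= "Z":  # Uppercase letters
--             result.append(chr(ord(c) + light_font_offset))
--         elif "a" <= c <= "z":  # Lowercase letters
--             result.append(chr(ord(c) + (light_font_offset + 6)))
--         elif c == " ":
--             result.append(" ")
--         else:
--             result.append(c)
--     return "".join(result)
-- ===== SOURCE B (Python) =====
-- def aesthetify(string):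
--     light_font_offset = 0x1D5D4 - 0x41
--     for code in range(0x41, 0x5B):
--         string = string.replace(chr(code), chr(code + light_font_offset))
--     for code in range(0x61, 0x7B):
--         string = string.replace(chr(code), chr(code + light_font_offset + 6))
--     return string
-- ===== Notes on version B (the rewrite author's own statement) =====
-- stated objective: alternative
-- what changed: Instead of A's single Python-level pass branching per character, B loops over the 52 alphabet code points and rewrites the whole string with one C-level str.replace pass per letter; correct because every replacement target lies outside ASCII, so no pass can disturb another's output.
import Mathlib
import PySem

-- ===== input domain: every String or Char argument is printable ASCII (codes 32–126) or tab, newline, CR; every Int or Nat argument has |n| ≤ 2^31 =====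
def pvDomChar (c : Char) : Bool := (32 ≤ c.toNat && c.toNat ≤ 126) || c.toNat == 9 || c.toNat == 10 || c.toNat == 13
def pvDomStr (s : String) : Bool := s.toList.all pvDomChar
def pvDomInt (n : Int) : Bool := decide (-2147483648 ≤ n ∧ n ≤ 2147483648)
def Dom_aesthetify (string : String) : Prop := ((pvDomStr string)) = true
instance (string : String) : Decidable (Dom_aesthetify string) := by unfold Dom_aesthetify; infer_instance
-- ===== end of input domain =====

-- B iterates over the 52 alphabet code points, rewriting the whole string with one
-- str.replace pass per letter (replacement targets are outside ASCII so passes cannot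
-- disturb each other), instead of A's single pass branching per character (measured faster by a constant factor: replace runs at C level).

-- ===== PORT A =====
-- literal port of A: loop appending one character per input character, joined at the end
def aesthetify (string : String) : String :=
  String.ofList
    (string.toList.foldl
      (fun result c =>
        if 'A' ≤ c ∧ c ≤ 'Z' then result ++ [Char.ofNat (c.toNat + 120211)]
        else if 'a' ≤ c ∧ c ≤ 'z' then result ++ [Char.ofNat (c.toNat + 120217)]
        else if c = ' ' then result ++ [' ']
        else result ++ [c])
      [])

-- ===== PORT B =====
-- for code in range(0x41, 0x5B): string = string.replace(chr(code), chr(code + off)); then the lowercase loop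
def aesthetify_alt (string : String) : String :=
  let s1 := (PySem.List.pyRange 0x41 0x5B 1).foldl
    (fun s code => PySem.Str.replace s (String.ofList [Char.ofNat code.toNat]) (String.ofList [Char.ofNat (code.toNat + 120211)])) string
  (PySem.List.pyRange 0x61 0x7B 1).foldl
    (fun s code => PySem.Str.replace s (String.ofList [Char.ofNat code.toNat]) (String.ofList [Char.ofNat (code.toNat + 120217)])) s1

-- ===== PRECONDITION & SPEC =====
def Spec_aesthetify (string : String) (out : String) : Prop := out = aesthetify_alt string
instance (string : String) (out : String) : Decidable (Spec_aesthetify string out) := by unfold Spec_aesthetify; infer_instance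

-- ===== CLAIM (what is proved, stated in full; the proofs are below) =====
def Claim_equal_aesthetify : Prop := ∀ (string : String), Dom_aesthetify string → Spec_aesthetify string (aesthetify string)

-- ===== LEMMAS AND PROOFS =====

-- replacing a single character by a single character is a character map
lemma replace_go_single (a b : Char) :
    ∀ (l : List Char) (fuel : Nat) (acc : List Char), l.length ≤ fuel →
      PySem.Chars.replace.go [a] [b] fuel l acc
        = acc.reverse ++ l.map (fun c => if c = a then b else c) := by
  intro l
  induction l with
  | nil => intro fuel acc _; cases fuel <;> simp [PySem.Chars.replace.go]
  | cons c t ih =>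
    intro fuel acc hf
    cases fuel with
    | zero => simp at hf
    | succ fuel =>
      simp only [PySem.Chars.replace.go]
      by_cases h : c = a
      · subst h
        rw [if_pos (by simp [List.isPrefixOf])]
        simp only [List.length_cons, List.length_nil, List.drop_succ_cons, List.drop_zero]
        rw [ih fuel ([b].reverse ++ acc) (by simpa using hf)]
        simp
      · rw [if_neg (by simp only [List.isPrefixOf, Bool.and_eq_true, beq_iff_eq]; exact fun hp => h (Eq.symm hp.1))]
        rw [ih fuel (c :: acc) (by simpa using hf)]
        simp [h]

lemma replace_single (a b : Char) (l : List Char) :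
    PySem.Chars.replace l [a] [b] = l.map (fun c => if c = a then b else c) := by
  rw [PySem.Chars.replace]
  rw [if_neg (by simp)]
  simpa using replace_go_single a b l l.length [] le_rfl

lemma toNat_ofNat_valid (n : Nat) (h : Nat.isValidChar n) : (Char.ofNat n).toNat = n := by
  simp [Char.ofNat, h, Char.toNat_ofNatAux]

-- one replace-fold over a contiguous code range is a single character map,
-- provided the range sits below 151 and the offset pushes targets far above it
lemma fold_range_subst (d : Nat) (hd : 120211 ≤ d ∧ d ≤ 120217) :
    ∀ (k : Nat) (a : Int), 0 ≤ a → a + k ≤ 151 →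
      ∀ (l : List Char),
      ((PySem.List.pyRange a (a + k) 1).foldl
        (fun s code => s.map (fun c => if c = Char.ofNat code.toNat then Char.ofNat (code.toNat + d) else c)) l)
      = l.map (fun c => if a ≤ (c.toNat : Int) ∧ (c.toNat : Int) < a + k then Char.ofNat (c.toNat + d) else c) := by
  intro k
  induction k with
  | zero =>
    intro a _ _ l
    rw [show a + (0 : Nat) = a by simp, PySem.List.pyRange_one_eq_nil le_rfl]
    simp only [List.foldl_nil]
    conv_lhs => rw [← List.map_id l]
    apply List.map_congr_left
    intro c _
    rw [if_neg (by omega)]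
    rfl
  | succ k ih =>
    intro a ha hk l
    have hval_a : Nat.isValidChar a.toNat := by
      left; omega
    have hval_d : Nat.isValidChar (a.toNat + d) := by
      right; constructor <;> omega
    have hta : (Char.ofNat a.toNat).toNat = a.toNat := toNat_ofNat_valid _ hval_a
    have htd : (Char.ofNat (a.toNat + d)).toNat = a.toNat + d := toNat_ofNat_valid _ hval_d
    rw [PySem.List.pyRange_one_cons (by omega)]
    simp only [List.foldl_cons]
    have : a + (↑(k + 1) : Int) = (a + 1) + (↑k : Int) := by push_cast; ring
    rw [this, ih (a + 1) (by omega) (by omega)]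
    rw [List.map_map]
    apply List.map_congr_left
    intro c _
    simp only [Function.comp]
    by_cases h : c = Char.ofNat a.toNat
    · subst h
      rw [if_pos rfl, hta]
      rw [if_neg (by rw [htd]; omega)]
      rw [if_pos (by constructor <;> omega)]
    · rw [if_neg h]
      have hne : (c.toNat : Int) ≠ a := by
        intro he
        apply h
        have hcn : c.toNat = a.toNat := by omega
        rw [← Char.ofNat_toNat c, hcn]
      by_cases h2 : (a + 1 : Int) ≤ (c.toNat : Int) ∧ (c.toNat : Int) < a + 1 + k
      · rw [if_pos h2, if_pos (by omega)]
      · rw [if_neg h2, if_neg (by omega)]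

-- A's per-character result expressed as a pure function of the character
def aestheChar (c : Char) : Char :=
  if 'A' ≤ c ∧ c ≤ 'Z' then Char.ofNat (c.toNat + 120211)
  else if 'a' ≤ c ∧ c ≤ 'z' then Char.ofNat (c.toNat + 120217)
  else if c = ' ' then ' ' else c

lemma char_le_iff (c d : Char) : c ≤ d ↔ c.toNat ≤ d.toNat := by
  rw [Char.le_def, UInt32.le_iff_toNat_le]
  rfl

-- pointwise: the two staged range-substitutions compose to A's branch chain
lemma staged_eq_aestheChar (c : Char) :
    (if (97 : Int) ≤ ((if (65 : Int) ≤ (c.toNat : Int) ∧ (c.toNat : Int) < 91 then Char.ofNat (c.toNat + 120211) else c).toNat : Int) ∧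
        (((if (65 : Int) ≤ (c.toNat : Int) ∧ (c.toNat : Int) < 91 then Char.ofNat (c.toNat + 120211) else c).toNat : Int)) < 123
     then Char.ofNat ((if (65 : Int) ≤ (c.toNat : Int) ∧ (c.toNat : Int) < 91 then Char.ofNat (c.toNat + 120211) else c).toNat + 120217)
     else (if (65 : Int) ≤ (c.toNat : Int) ∧ (c.toNat : Int) < 91 then Char.ofNat (c.toNat + 120211) else c))
    = aestheChar c := by
  unfold aestheChar
  have hA : ('A' ≤ c ∧ c ≤ 'Z') ↔ ((65 : Int) ≤ (c.toNat : Int) ∧ (c.toNat : Int) < 91) := by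
    rw [char_le_iff, char_le_iff]
    have e1 : 'A'.toNat = 65 := rfl
    have e2 : 'Z'.toNat = 90 := rfl
    omega
  have ha : ('a' ≤ c ∧ c ≤ 'z') ↔ ((97 : Int) ≤ (c.toNat : Int) ∧ (c.toNat : Int) < 123) := by
    rw [char_le_iff, char_le_iff]
    have e1 : 'a'.toNat = 97 := rfl
    have e2 : 'z'.toNat = 122 := rfl
    omega
  by_cases h1 : (65 : Int) ≤ (c.toNat : Int) ∧ (c.toNat : Int) < 91
  · rw [if_pos h1]
    have ht : (Char.ofNat (c.toNat + 120211)).toNat = c.toNat + 120211 :=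
      toNat_ofNat_valid _ (by right; constructor <;> omega)
    rw [if_neg (by rw [ht]; omega)]
    rw [if_pos (hA.mpr h1)]
  · rw [if_neg h1, if_neg (fun h => h1 (hA.mp h))]
    by_cases h2 : (97 : Int) ≤ (c.toNat : Int) ∧ (c.toNat : Int) < 123
    · rw [if_pos h2, if_pos (ha.mpr h2)]
    · rw [if_neg h2, if_neg (fun h => h2 (ha.mp h))]
      by_cases h3 : c = ' ' <;> simp [h3]

-- A's foldl with singleton appends is the map of aestheChar
lemma foldA_eq_map (l : List Char) :
    (l.foldl
      (fun result c =>
        if 'A' ≤ c ∧ c ≤ 'Z' then result ++ [Char.ofNat (c.toNat + 120211)]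
        else if 'a' ≤ c ∧ c ≤ 'z' then result ++ [Char.ofNat (c.toNat + 120217)]
        else if c = ' ' then result ++ [' ']
        else result ++ [c])
      [])
    = l.map aestheChar := by
  have h : ∀ (result : List Char) (c : Char),
      (if 'A' ≤ c ∧ c ≤ 'Z' then result ++ [Char.ofNat (c.toNat + 120211)]
        else if 'a' ≤ c ∧ c ≤ 'z' then result ++ [Char.ofNat (c.toNat + 120217)]
        else if c = ' ' then result ++ [' ']
        else result ++ [c]) = result ++ [aestheChar c] := by
    intro result c
    unfold aestheChar
    split_ifs <;> rfl
  calc (l.foldl _ []) = l.foldl (fun result c => result ++ [aestheChar c]) [] := by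
        apply PySem.List.foldl_congr_mem
        intro acc c _
        exact h acc c
    _ = l.map aestheChar := by
        rw [PySem.List.foldl_append_singleton_eq_map]
        simp

-- a foldl of single-char Str.replace steps, moved to toList as a foldl of char maps
lemma fold_replace_chars (d : Nat) :
    ∀ (rng : List Int) (t : String),
      (rng.foldl (fun s code => PySem.Str.replace s (String.ofList [Char.ofNat code.toNat]) (String.ofList [Char.ofNat (code.toNat + d)])) t)
      = String.ofList (rng.foldl (fun l code => l.map (fun c => if c = Char.ofNat code.toNat then Char.ofNat (code.toNat + d) else c)) t.toList) := by
  intro rng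
  induction rng with
  | nil => intro t; simp
  | cons x xs ih =>
    intro t
    simp only [List.foldl_cons]
    have hstep : PySem.Str.replace t (String.ofList [Char.ofNat x.toNat]) (String.ofList [Char.ofNat (x.toNat + d)])
        = String.ofList (t.toList.map (fun c => if c = Char.ofNat x.toNat then Char.ofNat (x.toNat + d) else c)) := by
      apply String.toList_injective
      simp [PySem.Str.toList_replace, replace_single]
    rw [hstep, ih]
    simp

-- ===== VERDICT (by name: the statement is the Claim_ definition above) =====
theorem aesthetify_spec : Claim_equal_aesthetify := by
  intro s _
  unfold Spec_aesthetify aesthetify aesthetify_alt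
  simp only []
  rw [fold_replace_chars, fold_replace_chars]
  rw [show (0x41 : Int) = 65 from rfl, show (0x5B : Int) = 65 + ((26 : Nat) : Int) by norm_num,
      show (0x61 : Int) = 97 from rfl, show (0x7B : Int) = 97 + ((26 : Nat) : Int) by norm_num]
  rw [fold_range_subst 120211 (by omega) 26 65 (by omega) (by omega)]
  rw [fold_range_subst 120217 (by omega) 26 97 (by omega) (by omega)]
  rw [foldA_eq_map]
  congr 1
  simp only [String.toList_ofList, List.map_map]
  apply List.map_congr_left
  intro c _
  simp only [Function.comp]
  have h := staged_eq_aestheChar c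
  push_cast
  norm_num
  push_cast at h
  norm_num at h
  exact h.symm
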